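-- pv_equiv track=rewrite | github.com/PavelPatsey/yandex_contest | internship_autumn_winter_2022_backend/b/b.py | get_travel_times
-- ===== SOURCE A (Python) =====
-- from collections import defaultdict
--
-- def get_travel_times(data):
--     travel_times = defaultdict(int)
--     id_storage = defaultdict(int)
--     for record in data:
--         time, id, status = record[0], record[1], record[2]
--         if status == "A":
--             id_storage[id] = time
--         elif status == "B":
--             pass
--         elif status in ("C", "S"):
--             dt = time - id_storage[id]
--             travel_times[id] += dt
--             id_storage[id] = 0
--
--     return travel_times
-- ===== SOURCE B (Python) =====
-- from collections import defaultdict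
--
-- def get_travel_times(data):
--     # Group the event records per id first, then total each id's trips
--     # independently with a local "departure time" accumulator.
--     groups = defaultdict(list)
--     for time, id, status in data:
--         groups[id].append((time, status))
--     travel_times = defaultdict(int)
--     for id, records in groups.items():
--         last = 0
--         for time, status in records:
--             if status == "A":
--                 last = time
--             elif status in ("C", "S"):
--                 travel_times[id] += time - last
--                 last = 0
--     return travel_times
-- ===== Notes on version B (the rewrite author's own statement) =====
-- stated objective: alternative
-- what changed: Replaces A's single flat scan over two shared defaultdicts by an index-first decomposition (group records per id in one pass, then total each id's trips with a local accumulator); Pre_ excludes inputs where some id's first record precedes another id's first C/S record while its own first C/S comes later, on which the two dicts' insertion orders (an accidental corner nobody would specify) differ though they are equal as mappings.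
import Mathlib
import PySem

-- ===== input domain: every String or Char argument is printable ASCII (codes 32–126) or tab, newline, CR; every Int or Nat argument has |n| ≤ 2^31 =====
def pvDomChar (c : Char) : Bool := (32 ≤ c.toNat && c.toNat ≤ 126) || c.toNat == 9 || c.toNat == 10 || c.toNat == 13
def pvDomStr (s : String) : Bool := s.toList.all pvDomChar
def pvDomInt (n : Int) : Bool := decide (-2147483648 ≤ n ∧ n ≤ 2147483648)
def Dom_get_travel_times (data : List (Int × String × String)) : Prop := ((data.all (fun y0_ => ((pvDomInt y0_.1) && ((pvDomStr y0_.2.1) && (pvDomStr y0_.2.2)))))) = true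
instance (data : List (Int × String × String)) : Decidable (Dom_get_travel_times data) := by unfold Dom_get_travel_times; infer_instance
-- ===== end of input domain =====

-- B replaces A's single flat scan with shared dicts by an index-first decomposition
-- (group records per id, then total each id's trips independently); objective: alternative.
-- Pre_ excludes inputs where the two result dicts' insertion orders differ (equal as mappings).


-- ===== PORT A =====
-- one step of A's loop over (travel_times, id_storage)
def pvStepA (st : PySem.Dict String Int × PySem.Dict String Int)
    (r : Int × String × String) : PySem.Dict String Int × PySem.Dict String Int :=
  if r.2.2 == "A" then (st.1, st.2.insert r.2.1 r.1)
  else if r.2.2 == "B" then st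
  else if r.2.2 == "C" || r.2.2 == "S" then
    (st.1.modify r.2.1 0 (· + (r.1 - st.2.getD r.2.1 0)), st.2.insert r.2.1 0)
  else st

def get_travel_times (data : List (Int × String × String)) : List (String × Int) :=
  (data.foldl pvStepA (PySem.Dict.empty, PySem.Dict.empty)).1.items

-- ===== PORT B =====
-- groups: each id's (time, status) records, in data order
def pvGroupsB (data : List (Int × String × String)) : PySem.Dict String (List (Int × String)) :=
  data.foldl (fun d r => d.modify r.2.1 [] (· ++ [(r.1, r.2.2)])) PySem.Dict.empty

-- one step of B's inner loop for id i, over (travel_times, last)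
def pvStepB (i : String) (st : PySem.Dict String Int × Int) (q : Int × String) :
    PySem.Dict String Int × Int :=
  if q.2 == "A" then (st.1, q.1)
  else if q.2 == "C" || q.2 == "S" then (st.1.modify i 0 (· + (q.1 - st.2)), 0)
  else st

def get_travel_times_alt (data : List (Int × String × String)) : List (String × Int) :=
  ((pvGroupsB data).items.foldl (fun d p => (p.2.foldl (pvStepB p.1) (d, 0)).1)
    PySem.Dict.empty).items

-- ===== PRECONDITION & SPEC =====
-- Pre_ excludes inputs on which A still returns but the two result dicts' insertion orders
-- differ (they are always equal as mappings): inputs where the ids' first-appearance order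
-- disagrees with their first-C/S-record order — a dict-iteration-order corner nobody specifies.
def Pre_get_travel_times (data : List (Int × String × String)) : Prop :=
  (PySem.List.dedup (data.map (fun r => r.2.1))).filter
      (fun i => data.any (fun r => r.2.1 == i && (r.2.2 == "C" || r.2.2 == "S")))
    = PySem.List.dedup ((data.filter (fun r => r.2.2 == "C" || r.2.2 == "S")).map (fun r => r.2.1))
instance (data : List (Int × String × String)) : Decidable (Pre_get_travel_times data) := by
  unfold Pre_get_travel_times; infer_instance

def pvWitness_get_travel_times : (List (Int × String × String)) :=
  [(1, "x", "A"), (5, "x", "C"), (7, "y", "S")]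

def Spec_get_travel_times (data : List (Int × String × String)) (out : List (String × Int)) : Prop := out = get_travel_times_alt data
instance (data : List (Int × String × String)) (out : List (String × Int)) : Decidable (Spec_get_travel_times data out) := by unfold Spec_get_travel_times; infer_instance

-- ===== CLAIM (what is proved, stated in full; the proofs are below) =====
def Claim_equal_get_travel_times : Prop := ∀ (data : List (Int × String × String)), Dom_get_travel_times data → Pre_get_travel_times data → Spec_get_travel_times data (get_travel_times data)

-- ===== LEMMAS AND PROOFS =====

-- the per-id record list (what groups[i] holds)
def pvGrp (i : String) (data : List (Int × String × String)) : List (Int × String) :=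
  (data.filter (fun r => r.2.1 == i)).map (fun r => (r.1, r.2.2))

-- the per-id (last, total) scan B's inner loop performs, without the dict
def pvScanB (acc : Int × Int) (p : Int × String) : Int × Int :=
  if p.2 == "A" then (p.1, acc.2)
  else if p.2 == "C" || p.2 == "S" then (0, acc.2 + (p.1 - acc.1))
  else acc

def pvTot (i : String) (data : List (Int × String × String)) : Int :=
  ((pvGrp i data).foldl pvScanB (0, 0)).2

def pvLast (i : String) (data : List (Int × String × String)) : Int :=
  ((pvGrp i data).foldl pvScanB (0, 0)).1

-- A's key order: ids at their first C/S record
def pvOrderB (data : List (Int × String × String)) : List String :=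
  data.foldl (fun o r =>
    if (r.2.2 == "C" || r.2.2 == "S") && !(o.contains r.2.1) then o ++ [r.2.1] else o) []

theorem pvOrderB_append (data : List (Int × String × String)) (r : Int × String × String) :
    pvOrderB (data ++ [r]) =
      if (r.2.2 == "C" || r.2.2 == "S") && !((pvOrderB data).contains r.2.1)
      then pvOrderB data ++ [r.2.1] else pvOrderB data := by
  simp [pvOrderB, List.foldl_append]

theorem pvGrp_append (i : String) (data : List (Int × String × String))
    (r : Int × String × String) :
    pvGrp i (data ++ [r]) =
      pvGrp i data ++ (if r.2.1 == i then [(r.1, r.2.2)] else []) := by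
  by_cases h : r.2.1 == i <;> simp [pvGrp, List.filter_append, h]

theorem pvModify_eq_insert (d : PySem.Dict String Int) (k : String) (f : Int → Int) :
    d.modify k 0 f = d.insert k (f (d.getD k 0)) := PySem.Dict.ext_iff.mpr rfl

theorem pvOrderB_nodup (data : List (Int × String × String)) : (pvOrderB data).Nodup := by
  induction data using List.reverseRecOn with
  | nil => simp [pvOrderB]
  | append_singleton data r ih =>
    rw [pvOrderB_append]
    split
    · rename_i h
      simp only [Bool.and_eq_true, Bool.not_eq_true', List.contains_eq_mem,
        decide_eq_false_iff_not] at h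
      exact List.Nodup.append ih (List.nodup_singleton _)
        (fun a ha hb => h.2 ((List.mem_singleton.mp hb) ▸ ha))
    · exact ih

-- one concat step of the per-id scan
theorem pvFold_grp_append (i : String) (t : Int) (s : String)
    (data : List (Int × String × String)) :
    (pvGrp i (data ++ [(t, i, s)])).foldl pvScanB (0, 0)
      = pvScanB ((pvGrp i data).foldl pvScanB (0, 0)) (t, s) := by
  have h : pvGrp i (data ++ [(t, i, s)]) = pvGrp i data ++ [(t, s)] := by
    simp [pvGrp_append]
  rw [h, List.foldl_append]
  rfl

theorem pvOrderB_subset_append (data : List (Int × String × String))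
    (p : Int × String × String) : pvOrderB data ⊆ pvOrderB (data ++ [p]) := by
  rw [pvOrderB_append]
  split
  · exact List.subset_append_left _ _
  · exact List.Subset.refl _

theorem pvOrderB_mem_of_cs (data : List (Int × String × String))
    (r : Int × String × String) (hr : r ∈ data)
    (hcs : (r.2.2 == "C" || r.2.2 == "S") = true) : r.2.1 ∈ pvOrderB data := by
  induction data using List.reverseRecOn with
  | nil => cases hr
  | append_singleton l p ih =>
    rcases List.mem_append.mp hr with h | h
    · exact pvOrderB_subset_append l p (ih h)
    · have hrp : r = p := List.mem_singleton.mp h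
      subst hrp
      rw [pvOrderB_append]
      by_cases hm : r.2.1 ∈ pvOrderB l
      · split
        · exact List.mem_append_left _ hm
        · exact hm
      · rw [if_pos (by simp [hcs, hm])]
        exact List.mem_append_right _ (List.mem_singleton_self _)

-- no C/S record in the group ⇒ the scan's total is 0
theorem pvTot_zero_of_no_cs (l : List (Int × String))
    (h : ∀ p ∈ l, (p.2 == "C" || p.2 == "S") = false) :
    (l.foldl pvScanB (0, 0)).2 = 0 := by
  induction l using List.reverseRecOn with
  | nil => rfl
  | append_singleton l p ihp =>
    rw [List.foldl_append, List.foldl_cons, List.foldl_nil]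
    have hp := h p (List.mem_append_right _ (List.mem_singleton_self _))
    have hrest := ihp (fun q hq => h q (List.mem_append_left _ hq))
    simp only [Bool.or_eq_false_iff] at hp
    simp only [pvScanB]
    split_ifs with h1 h2
    · simpa using hrest
    · simp [hp.1, hp.2] at h2
    · simpa using hrest

-- the main invariant relating A's fold state to the per-id quantities
theorem pvMainInv (data : List (Int × String × String)) :
    (data.foldl pvStepA (PySem.Dict.empty, PySem.Dict.empty)).1.items
        = (pvOrderB data).map (fun i => (i, pvTot i data))
    ∧ (∀ i, (data.foldl pvStepA (PySem.Dict.empty, PySem.Dict.empty)).2.getD i 0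
        = pvLast i data) := by
  induction data using List.reverseRecOn with
  | nil =>
    refine ⟨rfl, fun i => ?_⟩
    simp [pvGrp, pvLast, PySem.Dict.getD_empty]
  | append_singleton data r ih =>
    obtain ⟨htt, hst⟩ := ih
    obtain ⟨t, i, s⟩ := r
    have hkeys : (data.foldl pvStepA (PySem.Dict.empty, PySem.Dict.empty)).1.keys
        = pvOrderB data := by
      simp only [PySem.Dict.keys, htt, List.map_map]
      rw [show ((fun x : String × Int => x.1) ∘ fun i => (i, pvTot i data)) = id
        from funext fun _ => rfl, List.map_id]
    have htotne : ∀ j, j ≠ i → pvTot j (data ++ [(t, i, s)]) = pvTot j data := by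
      intro j hj
      have hb : (i == j) = false := by simp [Ne.symm hj]
      simp [pvTot, pvGrp_append, hb]
    have hlastne : ∀ j, j ≠ i → pvLast j (data ++ [(t, i, s)]) = pvLast j data := by
      intro j hj
      have hb : (i == j) = false := by simp [Ne.symm hj]
      simp [pvLast, pvGrp_append, hb]
    rw [List.foldl_append, List.foldl_cons, List.foldl_nil]
    by_cases hA : s = "A"
    · subst hA
      have hstep : ∀ st : PySem.Dict String Int × PySem.Dict String Int,
          pvStepA st (t, i, "A") = (st.1, st.2.insert i t) := by
        intro st; simp [pvStepA]
      have horder : pvOrderB (data ++ [(t, i, "A")]) = pvOrderB data := by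
        rw [pvOrderB_append]; simp
      have htoti : pvTot i (data ++ [(t, i, "A")]) = pvTot i data := by
        simp only [pvTot, pvFold_grp_append, pvScanB]; simp
      have hlasti : pvLast i (data ++ [(t, i, "A")]) = t := by
        simp only [pvLast, pvFold_grp_append, pvScanB]; simp
      rw [hstep]
      refine ⟨?_, fun j => ?_⟩
      · rw [htt, horder]
        apply List.map_congr_left
        intro j _
        by_cases hji : j = i
        · subst hji; rw [htoti]
        · rw [htotne j hji]
      · by_cases hji : j = i
        · subst hji; rw [PySem.Dict.getD_insert_self, hlasti]
        · rw [PySem.Dict.getD_insert_of_ne _ _ _ hji, hst j, hlastne j hji]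
    · by_cases hB : s = "B"
      · subst hB
        have hstep : ∀ st : PySem.Dict String Int × PySem.Dict String Int,
            pvStepA st (t, i, "B") = st := by
          intro st; simp [pvStepA]
        have horder : pvOrderB (data ++ [(t, i, "B")]) = pvOrderB data := by
          rw [pvOrderB_append]; simp
        have htoti : pvTot i (data ++ [(t, i, "B")]) = pvTot i data := by
          simp only [pvTot, pvFold_grp_append, pvScanB]; simp
        have hlasti : pvLast i (data ++ [(t, i, "B")]) = pvLast i data := by
          simp only [pvLast, pvFold_grp_append, pvScanB]; simp
        rw [hstep]
        refine ⟨?_, fun j => ?_⟩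
        · rw [htt, horder]
          apply List.map_congr_left
          intro j _
          by_cases hji : j = i
          · subst hji; rw [htoti]
          · rw [htotne j hji]
        · by_cases hji : j = i
          · subst hji; rw [hst _, hlasti]
          · rw [hst j, hlastne j hji]
      · have hsA : (s == "A") = false := beq_eq_false_iff_ne.mpr hA
        have hsB : (s == "B") = false := beq_eq_false_iff_ne.mpr hB
        by_cases hCS : s = "C" ∨ s = "S"
        · have hcs : (s == "C" || s == "S") = true := by
            rcases hCS with h | h <;> simp [h]
          have hstep : ∀ st : PySem.Dict String Int × PySem.Dict String Int,
              pvStepA st (t, i, s)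
                = (st.1.modify i 0 (· + (t - st.2.getD i 0)), st.2.insert i 0) := by
            intro st; simp [pvStepA, hsA, hsB, hcs]
          have htoti : pvTot i (data ++ [(t, i, s)])
              = pvTot i data + (t - pvLast i data) := by
            simp only [pvTot, pvLast, pvFold_grp_append, pvScanB, hsA, hcs]
            simp
          have hlasti : pvLast i (data ++ [(t, i, s)]) = 0 := by
            simp only [pvLast, pvFold_grp_append, pvScanB, hsA, hcs]
            simp
          rw [hstep]
          refine ⟨?_, fun j => ?_⟩
          · rw [pvModify_eq_insert, hst i]
            by_cases hmem : i ∈ pvOrderB data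
            · have hcont : (data.foldl pvStepA (PySem.Dict.empty, PySem.Dict.empty)).1.contains i = true := by
                rw [PySem.Dict.contains_eq_decide_mem_keys, hkeys]; simpa
              have horder : pvOrderB (data ++ [(t, i, s)]) = pvOrderB data := by
                rw [pvOrderB_append]; simp [hcs, hmem]
              have hgetD : (data.foldl pvStepA (PySem.Dict.empty, PySem.Dict.empty)).1.getD i 0 = pvTot i data := by
                have hn : (data.foldl pvStepA (PySem.Dict.empty, PySem.Dict.empty)).1.keys.Nodup := by
                  rw [hkeys]; exact pvOrderB_nodup data
                have hm : (i, pvTot i data) ∈ (data.foldl pvStepA (PySem.Dict.empty, PySem.Dict.empty)).1.items := by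
                  rw [htt]; exact List.mem_map_of_mem hmem
                exact PySem.Dict.getD_of_mem_items _ hm hn 0
              rw [PySem.Dict.items_insert_of_contains _ _ hcont, hgetD, htt, horder,
                List.map_map]
              apply List.map_congr_left
              intro j hj
              by_cases hji : j = i
              · subst hji
                simp only [Function.comp_apply, beq_self_eq_true, if_true, htoti]
              · have hb : (j == i) = false := beq_eq_false_iff_ne.mpr hji
                simp only [Function.comp_apply, hb, Bool.false_eq_true, if_false,
                  htotne j hji]
            · have hcont : (data.foldl pvStepA (PySem.Dict.empty, PySem.Dict.empty)).1.contains i = false := by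
                rw [PySem.Dict.contains_eq_decide_mem_keys, hkeys]; simpa
              have horder : pvOrderB (data ++ [(t, i, s)]) = pvOrderB data ++ [i] := by
                rw [pvOrderB_append]; simp [hcs, hmem]
              have hgetD : (data.foldl pvStepA (PySem.Dict.empty, PySem.Dict.empty)).1.getD i 0 = 0 :=
                PySem.Dict.getD_of_not_contains _ _ hcont
              have htot0 : pvTot i data = 0 := by
                apply pvTot_zero_of_no_cs
                intro p hp
                simp only [pvGrp, List.mem_map, List.mem_filter] at hp
                obtain ⟨r, ⟨hrmem, hrid⟩, hrp⟩ := hp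
                by_contra hcsp
                have hpcs : (p.2 == "C" || p.2 == "S") = true := by
                  cases h : (p.2 == "C" || p.2 == "S") with
                  | false => exact absurd h hcsp
                  | true => rfl
                have hid : r.2.1 = i := by simpa using hrid
                have hs2 : p.2 = r.2.2 := by rw [← hrp]
                exact hmem (hid ▸ pvOrderB_mem_of_cs data r hrmem (hs2 ▸ hpcs))
              rw [PySem.Dict.items_insert_of_not_contains _ _ hcont, hgetD, htt, horder,
                List.map_append]
              congr 1
              · apply List.map_congr_left
                intro j hj
                have hji : j ≠ i := fun h => hmem (h ▸ hj)
                rw [htotne j hji]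
              · simp [htoti, htot0]
          · by_cases hji : j = i
            · subst hji; rw [PySem.Dict.getD_insert_self, hlasti]
            · rw [PySem.Dict.getD_insert_of_ne _ _ _ hji, hst j, hlastne j hji]
        · have hsC : (s == "C") = false := beq_eq_false_iff_ne.mpr (fun h => hCS (Or.inl h))
          have hsS : (s == "S") = false := beq_eq_false_iff_ne.mpr (fun h => hCS (Or.inr h))
          have hcs : (s == "C" || s == "S") = false := by rw [hsC, hsS]; rfl
          have hstep : ∀ st : PySem.Dict String Int × PySem.Dict String Int,
              pvStepA st (t, i, s) = st := by
            intro st; simp [pvStepA, hsA, hsB, hcs]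
          have horder : pvOrderB (data ++ [(t, i, s)]) = pvOrderB data := by
            rw [pvOrderB_append]; simp [hcs]
          have htoti : pvTot i (data ++ [(t, i, s)]) = pvTot i data := by
            simp only [pvTot, pvFold_grp_append, pvScanB, hsA, hcs]; simp
          have hlasti : pvLast i (data ++ [(t, i, s)]) = pvLast i data := by
            simp only [pvLast, pvFold_grp_append, pvScanB, hsA, hcs]; simp
          rw [hstep]
          refine ⟨?_, fun j => ?_⟩
          · rw [htt, horder]
            apply List.map_congr_left
            intro j _
            by_cases hji : j = i
            · subst hji; rw [htoti]
            · rw [htotne j hji]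
          · by_cases hji : j = i
            · subst hji; rw [hst _, hlasti]
            · rw [hst j, hlastne j hji]

-- A's key order is the first-occurrence dedup of the ids of the C/S records
theorem pvOrderB_eq_dedup (data : List (Int × String × String)) :
    pvOrderB data
      = PySem.List.dedup ((data.filter (fun r => r.2.2 == "C" || r.2.2 == "S")).map
          (fun r => r.2.1)) := by
  induction data using List.reverseRecOn with
  | nil => rfl
  | append_singleton data r ih =>
    rw [pvOrderB_append, List.filter_append]
    by_cases hcs : (r.2.2 == "C" || r.2.2 == "S") = true
    · simp only [hcs, List.filter_cons, List.filter_nil, if_true, List.map_append,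
        List.map_cons, List.map_nil, PySem.List.dedup, PySem.Set.ofList,
        List.foldl_append, List.foldl_cons, List.foldl_nil]
      rw [← PySem.Set.ofList, ← PySem.List.dedup, ← ih]
      simp [PySem.Set.add, PySem.Set.contains]
    · have hcs' : (r.2.2 == "C" || r.2.2 == "S") = false := by
        cases h : (r.2.2 == "C" || r.2.2 == "S") with
        | false => rfl
        | true => exact absurd h hcs
      simp [hcs', ih]

-- groups' keys are the ids in first-occurrence order
theorem pvGroups_keys (data : List (Int × String × String)) :
    (pvGroupsB data).keys = PySem.List.dedup (data.map (fun r => r.2.1)) := by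
  have h := PySem.Dict.keys_foldl_modify_key data (fun r => r.2.1) []
    (fun d r l => l ++ [(r.1, r.2.2)]) PySem.Dict.empty
  rw [pvGroupsB]
  show (List.foldl (fun d r => d.modify r.2.1 [] (fun l => l ++ [(r.1, r.2.2)])) PySem.Dict.empty data).keys = _
  rw [h, PySem.Dict.keys_empty, PySem.Set.update_nil_left, PySem.List.dedup]

theorem pvGroups_nodup_keys (data : List (Int × String × String)) :
    (pvGroupsB data).keys.Nodup := by
  exact PySem.Dict.nodup_keys_foldl_modify_key data (fun r => r.2.1) []
    (fun d r l => l ++ [(r.1, r.2.2)]) PySem.Dict.empty PySem.Dict.nodup_keys_empty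

theorem pvGroups_getD (data : List (Int × String × String)) (i : String) :
    (pvGroupsB data).getD i [] = pvGrp i data := by
  have h := PySem.Dict.getD_foldl_modify_append
    (l := data.map (fun r => (r.2.1, (r.1, r.2.2))))
    (d := (PySem.Dict.empty : PySem.Dict String (List (Int × String)))) (c := i)
  rw [List.foldl_map] at h
  simpa [pvGroupsB, pvGrp, List.filter_map, List.map_map, Function.comp] using h

theorem pvGroups_items (data : List (Int × String × String)) :
    (pvGroupsB data).items
      = (PySem.List.dedup (data.map (fun r => r.2.1))).map (fun i => (i, pvGrp i data)) := by
  rw [PySem.Dict.items_eq_map_keys _ (pvGroups_nodup_keys data) [], pvGroups_keys]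
  exact List.map_congr_left (fun i _ => by rw [pvGroups_getD])

-- B's inner loop = insert the scan total (if the group has a C/S record), thread last
theorem pvInner (i : String) (l : List (Int × String)) (d : PySem.Dict String Int)
    (hd : d.contains i = false) :
    (l.foldl (pvStepB i) (d, 0)).1
        = (if l.any (fun q => q.2 == "C" || q.2 == "S")
           then d.insert i ((l.foldl pvScanB (0, 0)).2) else d)
    ∧ (l.foldl (pvStepB i) (d, 0)).2 = (l.foldl pvScanB (0, 0)).1 := by
  induction l using List.reverseRecOn with
  | nil => exact ⟨rfl, rfl⟩
  | append_singleton l q ih =>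
    obtain ⟨h1, h2⟩ := ih
    rw [List.foldl_append, List.foldl_cons, List.foldl_nil,
      List.foldl_append, List.foldl_cons, List.foldl_nil, List.any_append]
    by_cases hA : q.2 = "A"
    · have hcs' : (q.2 == "C" || q.2 == "S") = false := by simp [hA]
      constructor
      · simp only [List.any_cons, List.any_nil, Bool.or_false]
        rw [hcs', Bool.or_false]
        simp [pvStepB, pvScanB, hA, h1]
      · simp [pvStepB, pvScanB, hA]
    · have hA' : (q.2 == "A") = false := beq_eq_false_iff_ne.mpr hA
      by_cases hcs : (q.2 == "C" || q.2 == "S") = true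
      · constructor
        · simp only [pvStepB, pvScanB, hA', hcs, Bool.false_eq_true, if_false, if_true,
            List.any_cons, List.any_nil, Bool.or_false, Bool.or_true]
          rw [h2]
          by_cases hany : l.any (fun q => q.2 == "C" || q.2 == "S") = true
          · rw [h1, if_pos hany, pvModify_eq_insert, PySem.Dict.getD_insert_self,
              PySem.Dict.insert_insert_self]
          · have hany' : l.any (fun q => q.2 == "C" || q.2 == "S") = false := by
              cases h : l.any (fun q => q.2 == "C" || q.2 == "S") with
              | false => rfl
              | true => exact absurd h hany
            have h0 : (l.foldl pvScanB (0, 0)).2 = 0 := by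
              apply pvTot_zero_of_no_cs
              intro p hp
              have := List.any_eq_false.mp hany' p hp
              cases h : (p.2 == "C" || p.2 == "S") with
              | false => rfl
              | true => exact absurd h this
            rw [h1, if_neg (by simp [hany']), pvModify_eq_insert,
              PySem.Dict.getD_of_not_contains _ _ hd, h0]
        · simp [pvStepB, pvScanB, hA', hcs]
      · have hcs' : (q.2 == "C" || q.2 == "S") = false := by
          cases h : (q.2 == "C" || q.2 == "S") with
          | false => rfl
          | true => exact absurd h hcs
        constructor
        · simp only [List.any_cons, List.any_nil, Bool.or_false]
          rw [hcs', Bool.or_false]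
          simp [pvStepB, pvScanB, hA', hcs', h1]
        · simp [pvStepB, pvScanB, hA', hcs', h2]

-- B's outer loop over fresh distinct keys
theorem pvOuter (ps : List (String × List (Int × String))) (d : PySem.Dict String Int)
    (hfresh : ∀ p ∈ ps, d.contains p.1 = false) (hnd : (ps.map (·.1)).Nodup) :
    (ps.foldl (fun d p => (p.2.foldl (pvStepB p.1) (d, 0)).1) d).items
      = d.items ++ (ps.filter (fun p => p.2.any (fun q => q.2 == "C" || q.2 == "S"))).map
          (fun p => (p.1, (p.2.foldl pvScanB (0, 0)).2)) := by
  induction ps generalizing d with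
  | nil => simp
  | cons p ps ih =>
    rw [List.foldl_cons]
    have hp := hfresh p (List.mem_cons_self)
    obtain ⟨h1, -⟩ := pvInner p.1 p.2 d hp
    simp only [List.map_cons, List.nodup_cons] at hnd
    by_cases hany : p.2.any (fun q => q.2 == "C" || q.2 == "S") = true
    · rw [h1, if_pos hany]
      have hfresh' : ∀ q ∈ ps, (d.insert p.1 ((p.2.foldl pvScanB (0, 0)).2)).contains q.1 = false := by
        intro q hq
        rw [PySem.Dict.contains_insert]
        have hne : (q.1 == p.1) = false :=
          beq_eq_false_iff_ne.mpr (fun h => hnd.1 (h ▸ List.mem_map_of_mem hq))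
        rw [hne, hfresh q (List.mem_cons_of_mem _ hq)]
        rfl
      rw [ih _ hfresh' hnd.2, PySem.Dict.items_insert_of_not_contains _ _ hp]
      simp [hany]
    · have hany' : p.2.any (fun q => q.2 == "C" || q.2 == "S") = false := by
        cases h : p.2.any (fun q => q.2 == "C" || q.2 == "S") with
        | false => rfl
        | true => exact absurd h hany
      rw [h1, if_neg (by simp [hany'])]
      rw [ih _ (fun q hq => hfresh q (List.mem_cons_of_mem _ hq)) hnd.2]
      simp [hany']

-- the group's C/S test equals the flat any-test Pre_ uses
theorem pvGrp_any_cs (i : String) (data : List (Int × String × String)) :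
    (pvGrp i data).any (fun q => q.2 == "C" || q.2 == "S")
      = data.any (fun r => r.2.1 == i && (r.2.2 == "C" || r.2.2 == "S")) := by
  simp [pvGrp, List.any_map, List.any_filter, Function.comp]

-- ===== VERDICT (by name: the statement is the Claim_ definition above) =====
theorem get_travel_times_spec : Claim_equal_get_travel_times := by
  intro data _ hpre
  unfold Spec_get_travel_times get_travel_times get_travel_times_alt
  obtain ⟨htt, -⟩ := pvMainInv data
  rw [htt, pvGroups_items]
  have hfresh : ∀ p ∈ (PySem.List.dedup (data.map (fun r => r.2.1))).map
      (fun i => (i, pvGrp i data)), (PySem.Dict.empty : PySem.Dict String Int).contains p.1 = false :=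
    fun p _ => PySem.Dict.contains_empty p.1
  have hnd : (((PySem.List.dedup (data.map (fun r => r.2.1))).map
      (fun i => (i, pvGrp i data))).map (·.1)).Nodup := by
    rw [List.map_map]
    rw [show ((fun x : String × List (Int × String) => x.1) ∘ fun i => (i, pvGrp i data)) = id
      from funext fun _ => rfl, List.map_id, PySem.List.dedup]
    exact PySem.Set.nodup_ofList _
  rw [pvOuter _ _ hfresh hnd]
  have hemp : (PySem.Dict.empty : PySem.Dict String Int).items = [] := rfl
  rw [hemp, List.nil_append, List.filter_map, List.map_map]
  have hfilter : ((PySem.List.dedup (data.map (fun r => r.2.1))).filter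
        ((fun p : String × List (Int × String) => p.2.any (fun q => q.2 == "C" || q.2 == "S"))
          ∘ (fun i => (i, pvGrp i data))))
      = pvOrderB data := by
    rw [pvOrderB_eq_dedup, ← hpre]
    apply List.filter_congr
    intro i _
    simp only [Function.comp_apply]
    exact pvGrp_any_cs i data
  rw [hfilter]
  apply List.map_congr_left
  intro j _
  simp only [Function.comp_apply, pvTot]
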